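-- pv_equiv track=rewrite | github.com/Yuuuuuu-xue/DataStructures_and_Algorithms | tree/count_nodes_with_the_highest_score/solution.py | countHighestScoreNodes
-- ===== SOURCE A (Python) =====
-- from typing import List
--
-- def countHighestScoreNodes(parents: List[int]) -> int:
--     n = len(parents)
--     num_nodes = [1 for _ in range(n)]
--     child = [[] for _ in range(n)]
--
--     # Find out the child, skip the first node because root node is not a child node of any node
--     for i in range(1, n):
--         parent = parents[i]
--         child[parent].append(i)
--
--     # Compute the num_nodes
--     def compute_num_nodes(i):
--         for c in child[i]:
--             # We can do this since each child can has only one parent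
--             # Thus compute_num_nodes will not be called twice for the same i
--             num_nodes[i] += compute_num_nodes(c)
--         return num_nodes[i]
--
--     compute_num_nodes(0)
--
--     # Find out the score
--     max_score = 0
--     num_highest_score_nodes = 0
--     total_nodes = num_nodes[0]
--
--     for i in range(n):
--         score = 1
--         for c in child[i]:
--             score *= num_nodes[c]
--
--         # If it has a parent
--         if i != 0:
--             score *= (total_nodes - num_nodes[i])
--
--         if score > max_score:
--             max_score = score
--             num_highest_score_nodes = 1
--         elif score == max_score:
--             num_highest_score_nodes += 1
--
--     return num_highest_score_nodes
-- ===== SOURCE B (Python) =====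
-- from typing import List
--
-- def countHighestScoreNodes(parents: List[int]) -> int:
--     n = len(parents)
--     children = [[] for _ in range(n)]
--     for i in range(1, n):
--         children[parents[i]].append(i)
--
--     # Preorder of the root's component via an explicit stack, no recursion.
--     order = []
--     stack = [0]
--     while stack:
--         v = stack.pop()
--         order.append(v)
--         stack.extend(children[v])
--
--     # Subtree sizes bottom-up: walk the order backwards and push each node's
--     # accumulated size into its parent.
--     size = [1] * n
--     for v in reversed(order):
--         if v != 0:
--             size[parents[v]] += size[v]
--
--     total = size[0]
--
--     # Children products, again by distributing into the parent's slot.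
--     prod = [1] * n
--     for j in range(1, n):
--         prod[parents[j]] *= size[j]
--
--     max_score = 0
--     count = 0
--     for i in range(n):
--         score = prod[i] if i == 0 else prod[i] * (total - size[i])
--         if score > max_score:
--             max_score = score
--             count = 1
--         elif score == max_score:
--             count += 1
--     return count
-- ===== Notes on version B (the rewrite author's own statement) =====
-- stated objective: alternative
-- what changed: Subtree sizes are computed without recursion: an explicit-stack preorder traversal of the built child lists yields an order, the order is walked backwards pushing each node's accumulated size into its parent's slot, and children products are likewise accumulated by distributing each node's size into its parent's slot, replacing A's recursive DFS and its per-node inner product loop; Pre_ admits exactly the inputs on which A returns (nonempty list, non-root entries valid Python indices in [-n,n)).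
import Mathlib
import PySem

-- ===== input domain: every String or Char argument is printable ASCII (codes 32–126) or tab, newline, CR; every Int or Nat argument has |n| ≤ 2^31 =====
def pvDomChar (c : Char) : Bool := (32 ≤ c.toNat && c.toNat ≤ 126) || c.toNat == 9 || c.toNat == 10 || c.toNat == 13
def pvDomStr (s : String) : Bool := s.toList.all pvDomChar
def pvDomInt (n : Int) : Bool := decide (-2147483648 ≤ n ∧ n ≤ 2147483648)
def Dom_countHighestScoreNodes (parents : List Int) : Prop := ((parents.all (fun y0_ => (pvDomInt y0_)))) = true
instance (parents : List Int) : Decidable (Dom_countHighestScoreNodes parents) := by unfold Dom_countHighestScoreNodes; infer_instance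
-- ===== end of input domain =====

-- B replaces A's recursive DFS with an explicit-stack preorder traversal plus two
-- reverse/distribution passes (sizes pushed into the parent slot, children products
-- accumulated into the parent slot); same return value wherever A returns (Pre_).

-- ===== PORT A =====
-- parents[i] read as a Python list index (negative entries count from the end);
-- exact whenever the entry lies in [-n, n), which Pre_ guarantees
def pvPar (ps : List Int) (i : Nat) : Nat :=
  let q := ps.getD i 0
  (if q < 0 then q + ps.length else q).toNat

-- child[parents[i]].append(i) for i in range(1, n)  (the same loop appears in Source B)
def pvBuildChild (ps : List Int) : List (List Nat) :=
  ((List.range ps.length).drop 1).foldl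
    (fun ch i =>
      let q := pvPar ps i
      ch.set q (ch.getD q [] ++ [i]))
    (List.replicate ps.length [])

-- compute_num_nodes: recursion with fuel (fuel n+1 never runs out inside Pre_);
-- the num_nodes array is threaded as state exactly as Python mutates it.
def pvDfsA (child : List (List Nat)) : Nat → List Int → Nat → List Int × Int
  | 0, num, _ => (num, 0)
  | fuel+1, num, i =>
      let num' := (child.getD i []).foldl
        (fun acc c =>
          let r := pvDfsA child fuel acc c
          r.1.set i (r.1.getD i 0 + r.2)) num
      (num', num'.getD i 0)

def countHighestScoreNodes (parents : List Int) : Int :=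
  let n := parents.length
  let child := pvBuildChild parents
  let num := (pvDfsA child (n+1) (List.replicate n (1 : Int)) 0).1
  let total := num.getD 0 0
  let r := (List.range n).foldl
    (fun (st : Int × Int) i =>
      let base := (child.getD i []).foldl (fun s c => s * num.getD c 0) 1
      let score := if i ≠ 0 then base * (total - num.getD i 0) else base
      if score > st.1 then (score, 1)
      else if score = st.1 then (st.1, st.2 + 1)
      else st)
    ((0 : Int), (0 : Int))
  r.2

-- ===== PORT B =====
-- Source B's `while stack` loop, with fuel (n+1 suffices inside Pre_).  The stack is
-- kept top-at-head (Python keeps the top at the end: pop() takes the last element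
-- and extend appends, so the last child pushed is popped first).
def pvStackOrder (child : List (List Nat)) : Nat → List Nat → List Nat → List Nat
  | 0, _, order => order
  | _+1, [], order => order
  | fuel+1, v :: st, order =>
      pvStackOrder child fuel ((child.getD v []).reverse ++ st) (order ++ [v])

def countHighestScoreNodes_alt (parents : List Int) : Int :=
  let n := parents.length
  let children := pvBuildChild parents
  let order := pvStackOrder children (n+1) [0] []
  let size := order.reverse.foldl
    (fun sz v => if v = 0 then sz
      else sz.set (pvPar parents v) (sz.getD (pvPar parents v) 0 + sz.getD v 0))
    (List.replicate n (1 : Int))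
  let total := size.getD 0 0
  let prod := ((List.range n).drop 1).foldl
    (fun pr j =>
      let q := pvPar parents j
      pr.set q (pr.getD q 1 * size.getD j 0))
    (List.replicate n (1 : Int))
  let r := (List.range n).foldl
    (fun (st : Int × Int) i =>
      let score := if i = 0 then prod.getD i 1 else prod.getD i 1 * (total - size.getD i 0)
      if score > st.1 then (score, 1)
      else if score = st.1 then (st.1, st.2 + 1)
      else st)
    ((0 : Int), (0 : Int))
  r.2

-- ===== PRECONDITION & SPEC =====
-- Pre_ admits exactly the inputs on which A returns: a nonempty list whose non-root
-- entries are valid Python indices in [-n, n) (A raises IndexError otherwise, and on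
-- the empty list).  Nothing that A accepts is excluded.
def Pre_countHighestScoreNodes (parents : List Int) : Prop :=
  parents ≠ [] ∧ ∀ i, i < parents.length → 1 ≤ i →
    -(parents.length : Int) ≤ parents.getD i 0 ∧ parents.getD i 0 < (parents.length : Int)

instance (parents : List Int) : Decidable (Pre_countHighestScoreNodes parents) := by
  unfold Pre_countHighestScoreNodes; infer_instance

def pvWitness_countHighestScoreNodes : List Int := [-1, 0, 0, 2]

def Spec_countHighestScoreNodes (parents : List Int) (out : Int) : Prop := out = countHighestScoreNodes_alt parents
instance (parents : List Int) (out : Int) : Decidable (Spec_countHighestScoreNodes parents out) := by unfold Spec_countHighestScoreNodes; infer_instance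

-- ===== CLAIM (what is proved, stated in full; the proofs are below) =====
def Claim_equal_countHighestScoreNodes : Prop := ∀ (parents : List Int), Dom_countHighestScoreNodes parents → Pre_countHighestScoreNodes parents → Spec_countHighestScoreNodes parents (countHighestScoreNodes parents)

-- ===== LEMMAS AND PROOFS =====

-- ---- proof-layer definitions ----

-- parent chain of j (stops at the root 0), computed with fuel
def chainF (ps : List Int) : Nat → Nat → List Nat
  | 0, j => [j]
  | f+1, j => if j = 0 then [0] else j :: chainF ps f (pvPar ps j)

-- the (possibly truncated) chain; fuel = n suffices for nodes that reach the root
def CC (ps : List Int) (j : Nat) : List Nat := chainF ps ps.length j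

-- subtree size of i = number of nodes whose chain passes through i
def SS (ps : List Int) (i : Nat) : Nat :=
  (List.range ps.length).countP (fun j => decide (i ∈ CC ps j))

-- children of i, in increasing order (= what the shared build loop produces)
def childL (ps : List Int) (i : Nat) : List Nat :=
  ((List.range ps.length).drop 1).filter (fun j => pvPar ps j = i)

-- semantic content of Pre_: nonempty, non-root parent links land inside the list
def Good (ps : List Int) : Prop :=
  1 ≤ ps.length ∧ ∀ i, i < ps.length → 1 ≤ i → pvPar ps i < ps.length

-- node i's parent chain reaches the root
def Reach (ps : List Int) (i : Nat) : Prop := ∃ k, (pvPar ps)^[k] i = 0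

-- k is the exact distance from i to the root along parent links
def DepthOf (ps : List Int) (i k : Nat) : Prop :=
  (pvPar ps)^[k] i = 0 ∧ ∀ t, t < k → (pvPar ps)^[t] i ≠ 0

-- the canonical preorder listing of the subtree below v (children reversed, as the
-- LIFO stack visits them); fuel ps.length is always enough for reachable v
def preF (ps : List Int) : Nat → Nat → List Nat
  | 0, v => [v]
  | f+1, v => v :: ((childL ps v).reverse.map (preF ps f)).flatten

def PRE (ps : List Int) (v : Nat) : List Nat := preF ps ps.length v

-- ---- basic list lemmas ----
lemma getD_set_self {α : Type} (l : List α) (i : Nat) (a d : α) (h : i < l.length) :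
    (l.set i a).getD i d = a := by
  simp [List.getD_eq_getElem?_getD, h]

lemma getD_set_ne {α : Type} (l : List α) (i j : Nat) (a d : α) (h : i ≠ j) :
    (l.set i a).getD j d = l.getD j d := by
  simp [List.getD_eq_getElem?_getD, List.getElem?_set_ne h]

lemma getD_replicate {α : Type} (n j : Nat) (a d : α) (h : j < n) :
    (List.replicate n a).getD j d = a := by
  simp [List.getD_eq_getElem?_getD, h]

lemma range_drop_one (n : Nat) : (List.range n).drop 1 = (List.range (n-1)).map Nat.succ := by
  cases n with
  | zero => simp
  | succ m => simp [List.range_succ_eq_map]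

lemma mem_range_drop_one (n c : Nat) : c ∈ (List.range n).drop 1 ↔ 1 ≤ c ∧ c < n := by
  rw [range_drop_one]
  simp [List.mem_map, List.mem_range]
  constructor
  · rintro ⟨a, ha, rfl⟩; omega
  · intro ⟨h1, h2⟩; exact ⟨c - 1, by omega, by omega⟩

lemma countP_eq_sum_map (l : List Nat) (p : Nat → Bool) :
    l.countP p = (l.map (fun x => if p x then 1 else 0)).sum := by
  induction l with
  | nil => simp
  | cons x xs ih => by_cases h : p x <;> simp [h, ih] <;> try omega

-- ---- Pre_ unpacking ----
lemma good_of_pre (ps : List Int) (h : Pre_countHighestScoreNodes ps) : Good ps := by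
  obtain ⟨hne, h⟩ := h
  have hlen : 1 ≤ ps.length := by cases ps <;> simp_all
  refine ⟨hlen, fun i hi h1 => ?_⟩
  obtain ⟨ha, hb⟩ := h i hi h1
  have hpv : pvPar ps i = (if ps.getD i 0 < 0 then ps.getD i 0 + ps.length
      else ps.getD i 0).toNat := rfl
  rw [hpv]; split <;> omega

-- ---- depth / chain lemmas ----
lemma depth_exists (ps : List Int) (i : Nat) (hr : Reach ps i) :
    ∃ k, DepthOf ps i k := by
  obtain ⟨k, hk0⟩ := hr
  have hex : ∃ m, (pvPar ps)^[m] i = 0 := ⟨k, hk0⟩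
  exact ⟨Nat.find hex, Nat.find_spec hex, fun t ht => Nat.find_min hex ht⟩

lemma iter_lt (ps : List Int) (hg : Good ps) (i k : Nat) (hi : i < ps.length)
    (hd : DepthOf ps i k) : ∀ t, t ≤ k → (pvPar ps)^[t] i < ps.length := by
  intro t
  induction t with
  | zero => simpa using hi
  | succ s ih =>
      intro hs
      have hlt : (pvPar ps)^[s] i < ps.length := ih (by omega)
      have hne : (pvPar ps)^[s] i ≠ 0 := hd.2 s (by omega)
      rw [Function.iterate_succ_apply']
      exact hg.2 _ hlt (by omega)

lemma iter_inj (ps : List Int) (i k : Nat) (hd : DepthOf ps i k) :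
    ∀ a b, a ≤ k → b ≤ k → (pvPar ps)^[a] i = (pvPar ps)^[b] i → a = b := by
  have key : ∀ a b, a < b → b ≤ k → (pvPar ps)^[a] i ≠ (pvPar ps)^[b] i := by
    intro a b hab hbk heq
    have h0 : (pvPar ps)^[k - b] ((pvPar ps)^[b] i) = 0 := by
      rw [← Function.iterate_add_apply]
      have : k - b + b = k := by omega
      rw [this]; exact hd.1
    have h0' : (pvPar ps)^[k - b + a] i = 0 := by
      rw [Function.iterate_add_apply, heq]; exact h0
    exact hd.2 (k - b + a) (by omega) h0'
  intro a b ha hb heq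
  rcases Nat.lt_trichotomy a b with h | h | h
  · exact absurd heq (key a b h hb)
  · exact h
  · exact absurd heq.symm (key b a h ha)

lemma depth_lt (ps : List Int) (hg : Good ps) (i k : Nat) (hi : i < ps.length)
    (hd : DepthOf ps i k) : k < ps.length := by
  by_contra hk
  push Not at hk
  have inj : Function.Injective (fun t : Fin (ps.length+1) => (pvPar ps)^[(t:Nat)] i) := by
    intro a b hab
    exact Fin.ext (iter_inj ps i k hd a b (by omega) (by omega) hab)
  have hmaps : ∀ t : Fin (ps.length+1), (pvPar ps)^[(t:Nat)] i < ps.length := by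
    intro t; exact iter_lt ps hg i k hi hd t (by omega)
  have := Fintype.card_le_of_injective
    (fun t : Fin (ps.length+1) => (⟨(pvPar ps)^[(t:Nat)] i, hmaps t⟩ : Fin ps.length))
    (fun a b hab => inj (by simpa using congrArg Fin.val hab))
  simp at this

lemma depth_zero (ps : List Int) : DepthOf ps 0 0 := ⟨rfl, fun t ht => by omega⟩

lemma depth_succ (ps : List Int) (i k : Nat) (hi : i ≠ 0) (hd : DepthOf ps i k) :
    1 ≤ k ∧ DepthOf ps (pvPar ps i) (k-1) := by
  have hk1 : 1 ≤ k := by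
    by_contra hk
    have hk0 : k = 0 := by omega
    subst hk0
    exact hi (by simpa using hd.1)
  refine ⟨hk1, ?_, ?_⟩
  · have : (pvPar ps)^[k-1] (pvPar ps i) = (pvPar ps)^[k] i := by
      rw [← Function.iterate_succ_apply]
      congr 1; omega
    rw [this]; exact hd.1
  · intro t ht
    have : (pvPar ps)^[t] (pvPar ps i) = (pvPar ps)^[t+1] i := by
      rw [← Function.iterate_succ_apply]
    rw [this]; exact hd.2 (t+1) (by omega)

lemma depth_child (ps : List Int) (c i k : Nat) (hc : c ≠ 0) (hp : pvPar ps c = i)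
    (hd : DepthOf ps i k) : DepthOf ps c (k+1) := by
  refine ⟨?_, ?_⟩
  · rw [Function.iterate_succ_apply, hp]; exact hd.1
  · intro t ht
    cases t with
    | zero => simpa using hc
    | succ s =>
        rw [Function.iterate_succ_apply, hp]
        exact hd.2 s (by omega)

lemma chainF_char (ps : List Int) (hg : Good ps) :
    ∀ k f i, i < ps.length → DepthOf ps i k → k ≤ f →
      chainF ps f i = (List.range (k+1)).map (fun t => (pvPar ps)^[t] i) := by
  intro k
  induction k with
  | zero =>
      intro f i hi hd hf
      have h0 : i = 0 := by simpa using hd.1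
      subst h0
      cases f with
      | zero => simp [chainF]
      | succ f' => simp [chainF]
  | succ m ih =>
      intro f i hi hd hf
      have hi0 : i ≠ 0 := by
        have := hd.2 0 (by omega); simpa using this
      obtain ⟨f', rfl⟩ : ∃ f', f = f' + 1 := ⟨f - 1, by omega⟩
      have hstep := depth_succ ps i (m+1) hi0 hd
      have hplt : pvPar ps i < ps.length := hg.2 i hi (by omega)
      have hrec := ih f' (pvPar ps i) hplt (by simpa using hstep.2) (by omega)
      show chainF ps (f'+1) i = _
      rw [chainF, if_neg hi0, hrec]
      rw [List.range_succ_eq_map]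
      simp [List.map_map, Function.comp_def, Function.iterate_succ_apply]

lemma mem_CC_iff (ps : List Int) (hg : Good ps) (i j k : Nat) (hj : j < ps.length)
    (hd : DepthOf ps j k) : i ∈ CC ps j ↔ ∃ t, t ≤ k ∧ (pvPar ps)^[t] j = i := by
  have hk : k < ps.length := depth_lt ps hg j k hj hd
  rw [CC, chainF_char ps hg k ps.length j hj hd (by omega)]
  constructor
  · intro h
    obtain ⟨t, ht, rfl⟩ := List.mem_map.1 h
    exact ⟨t, by have := List.mem_range.1 ht; omega, rfl⟩
  · rintro ⟨t, ht, rfl⟩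
    exact List.mem_map.2 ⟨t, List.mem_range.2 (by omega), rfl⟩

lemma mem_CC_self (ps : List Int) (hg : Good ps) (i : Nat) (hi : i < ps.length)
    (hr : Reach ps i) : i ∈ CC ps i := by
  obtain ⟨k, hd⟩ := depth_exists ps i hr
  exact (mem_CC_iff ps hg i i k hi hd).2 ⟨0, by omega, rfl⟩

lemma mem_childL (ps : List Int) (c i : Nat) :
    c ∈ childL ps i ↔ (1 ≤ c ∧ c < ps.length) ∧ pvPar ps c = i := by
  rw [childL, List.mem_filter, mem_range_drop_one]
  simp

lemma childL_nodup (ps : List Int) (i : Nat) : (childL ps i).Nodup := by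
  apply List.Nodup.filter
  rw [range_drop_one]
  exact (List.nodup_range).map Nat.succ_injective

-- every element of a chain list is an iterate of the start node
lemma chainF_mem_iter (ps : List Int) :
    ∀ f j x, x ∈ chainF ps f j → ∃ t, t ≤ f ∧ (pvPar ps)^[t] j = x := by
  intro f
  induction f with
  | zero =>
      intro j x hx
      simp [chainF] at hx
      exact ⟨0, by omega, hx.symm⟩
  | succ f ih =>
      intro j x hx
      by_cases hj0 : j = 0
      · subst hj0
        simp [chainF] at hx
        exact ⟨0, by omega, hx.symm⟩
      · rw [chainF, if_neg hj0] at hx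
        rcases List.mem_cons.1 hx with h | h
        · exact ⟨0, by omega, h.symm⟩
        · obtain ⟨t, ht, hteq⟩ := ih (pvPar ps j) x h
          exact ⟨t+1, by omega, by rw [Function.iterate_succ_apply]; exact hteq⟩

lemma reach_of_mem (ps : List Int) (x j : Nat) (hrx : Reach ps x) (h : x ∈ CC ps j) :
    Reach ps j := by
  obtain ⟨t, -, hteq⟩ := chainF_mem_iter ps ps.length j x h
  obtain ⟨k, hk⟩ := hrx
  exact ⟨k + t, by rw [Function.iterate_add_apply, hteq]; exact hk⟩

lemma reach_child (ps : List Int) (c i : Nat) (hc : c ∈ childL ps i)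
    (hri : Reach ps i) : Reach ps c := by
  obtain ⟨-, hpc⟩ := (mem_childL ps c i).1 hc
  obtain ⟨k, hk⟩ := hri
  exact ⟨k + 1, by rw [Function.iterate_add_apply, Function.iterate_one, hpc]; exact hk⟩

-- child c of i is on j's chain → i is on j's chain
lemma chain_step (ps : List Int) (hg : Good ps) (c i j : Nat) (hj : j < ps.length)
    (hrj : Reach ps j)
    (hc : c ≠ 0) (hp : pvPar ps c = i) (h : c ∈ CC ps j) : i ∈ CC ps j := by
  obtain ⟨k, hd⟩ := depth_exists ps j hrj
  obtain ⟨t, ht, hti⟩ := (mem_CC_iff ps hg c j k hj hd).1 h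
  have htk : t < k := by
    rcases Nat.lt_or_ge t k with h' | h'
    · exact h'
    · exfalso
      have : t = k := by omega
      subst this
      rw [hd.1] at hti
      exact hc hti.symm
  refine (mem_CC_iff ps hg i j k hj hd).2 ⟨t+1, by omega, ?_⟩
  rw [Function.iterate_succ_apply', hti, hp]

-- i on j's chain, j ≠ i → some child of i is on j's chain
lemma chain_pred (ps : List Int) (hg : Good ps) (i j : Nat) (hj : j < ps.length)
    (hrj : Reach ps j)
    (hne : j ≠ i) (h : i ∈ CC ps j) : ∃ c, c ∈ childL ps i ∧ c ∈ CC ps j := by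
  obtain ⟨k, hd⟩ := depth_exists ps j hrj
  obtain ⟨t, ht, hti⟩ := (mem_CC_iff ps hg i j k hj hd).1 h
  have ht1 : 1 ≤ t := by
    by_contra h'
    have : t = 0 := by omega
    subst this
    exact hne hti
  have hcm : (pvPar ps)^[t-1] j ∈ CC ps j :=
    (mem_CC_iff ps hg _ j k hj hd).2 ⟨t-1, by omega, rfl⟩
  have hc0 : (pvPar ps)^[t-1] j ≠ 0 := hd.2 (t-1) (by omega)
  have hclt : (pvPar ps)^[t-1] j < ps.length := iter_lt ps hg j k hj hd (t-1) (by omega)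
  have hpc : pvPar ps ((pvPar ps)^[t-1] j) = i := by
    have h2 : (pvPar ps)^[t] j = pvPar ps ((pvPar ps)^[t-1] j) := by
      conv_lhs => rw [show t = (t-1)+1 by omega]
      rw [Function.iterate_succ_apply']
    rw [← h2, hti]
  exact ⟨_, (mem_childL ps _ i).2 ⟨⟨by omega, hclt⟩, hpc⟩, hcm⟩

-- at most one child of i on a given chain
lemma chain_child_unique (ps : List Int) (hg : Good ps) (i j c₁ c₂ : Nat) (hj : j < ps.length)
    (hrj : Reach ps j)
    (h₁ : c₁ ∈ childL ps i) (h₂ : c₂ ∈ childL ps i)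
    (m₁ : c₁ ∈ CC ps j) (m₂ : c₂ ∈ CC ps j) : c₁ = c₂ := by
  obtain ⟨k, hd⟩ := depth_exists ps j hrj
  obtain ⟨⟨hc₁, -⟩, hp₁⟩ := (mem_childL ps c₁ i).1 h₁
  obtain ⟨⟨hc₂, -⟩, hp₂⟩ := (mem_childL ps c₂ i).1 h₂
  obtain ⟨a, ha, hai⟩ := (mem_CC_iff ps hg c₁ j k hj hd).1 m₁
  obtain ⟨b, hb, hbi⟩ := (mem_CC_iff ps hg c₂ j k hj hd).1 m₂
  have hak : a < k := by
    rcases Nat.lt_or_ge a k with h' | h'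
    · exact h'
    · have : a = k := by omega
      subst this; rw [hd.1] at hai; omega
  have hbk : b < k := by
    rcases Nat.lt_or_ge b k with h' | h'
    · exact h'
    · have : b = k := by omega
      subst this; rw [hd.1] at hbi; omega
  have heq : (pvPar ps)^[a+1] j = (pvPar ps)^[b+1] j := by
    rw [Function.iterate_succ_apply', Function.iterate_succ_apply', hai, hbi, hp₁, hp₂]
  have := iter_inj ps j k hd (a+1) (b+1) (by omega) (by omega) heq
  have hab : a = b := by omega
  subst hab
  rw [← hai, ← hbi]

-- no child of i is on i's own chain
lemma chain_no_child_self (ps : List Int) (hg : Good ps) (i c : Nat) (hi : i < ps.length)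
    (hri : Reach ps i)
    (hc : c ∈ childL ps i) : c ∉ CC ps i := by
  intro hmem
  obtain ⟨k, hd⟩ := depth_exists ps i hri
  obtain ⟨⟨hc1, -⟩, hpc⟩ := (mem_childL ps c i).1 hc
  obtain ⟨t, ht, hti⟩ := (mem_CC_iff ps hg c i k hi hd).1 hmem
  have htk : t < k := by
    rcases Nat.lt_or_ge t k with h' | h'
    · exact h'
    · have : t = k := by omega
      subst this; rw [hd.1] at hti; omega
  have heq : (pvPar ps)^[t+1] i = (pvPar ps)^[0] i := by
    rw [Function.iterate_succ_apply', hti, hpc]; rfl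
  have := iter_inj ps i k hd (t+1) 0 (by omega) (by omega) heq
  omega

-- a reachable non-root node is not on its own parent's chain
lemma not_mem_CC_parent (ps : List Int) (hg : Good ps) (v d : Nat) (hv : v < ps.length)
    (hv0 : v ≠ 0) (hd : DepthOf ps v d) : v ∉ CC ps (pvPar ps v) := by
  intro hmem
  obtain ⟨h1, hd'⟩ := depth_succ ps v d hv0 hd
  have hplt : pvPar ps v < ps.length := hg.2 v hv (by omega)
  obtain ⟨t, ht, hteq⟩ := (mem_CC_iff ps hg v (pvPar ps v) (d-1) hplt hd').1 hmem
  have heq : (pvPar ps)^[t+1] v = (pvPar ps)^[0] v := by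
    rw [Function.iterate_succ_apply]
    simpa using hteq
  have := iter_inj ps v d hd (t+1) 0 (by omega) (by omega) heq
  omega

-- decomposition of the chain-membership predicate at a reachable node i
lemma chain_decomp (ps : List Int) (hg : Good ps) (i j : Nat) (hi : i < ps.length)
    (hri : Reach ps i) (hj : j < ps.length)
    (hne : j ≠ i) : i ∈ CC ps j ↔ ∃ c ∈ childL ps i, c ∈ CC ps j := by
  constructor
  · intro h
    have hrj : Reach ps j := reach_of_mem ps i j hri h
    obtain ⟨c, hc, hm⟩ := chain_pred ps hg i j hj hrj hne h
    exact ⟨c, hc, hm⟩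
  · rintro ⟨c, hc, hm⟩
    obtain ⟨⟨hc1, -⟩, hpc⟩ := (mem_childL ps c i).1 hc
    have hrc : Reach ps c := reach_child ps c i hc hri
    have hrj : Reach ps j := reach_of_mem ps c j hrc hm
    exact chain_step ps hg c i j hj hrj (by omega) hpc hm

-- per-node indicator decomposition of chain membership (i reachable)
lemma indicator_decomp (ps : List Int) (hg : Good ps) (i j : Nat)
    (hi : i < ps.length) (hri : Reach ps i) (hj : j < ps.length) :
    (if i ∈ CC ps j then (1:Nat) else 0) =
      (if j = i then 1 else 0) +
        ∑ c ∈ (childL ps i).toFinset, (if c ∈ CC ps j then 1 else 0) := by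
  by_cases hji : j = i
  · subst hji
    rw [if_pos (mem_CC_self ps hg j hj hri), if_pos rfl]
    have : ∑ c ∈ (childL ps j).toFinset, (if c ∈ CC ps j then (1:Nat) else 0) = 0 := by
      apply Finset.sum_eq_zero
      intro c hc
      rw [if_neg (chain_no_child_self ps hg j c hj hri (List.mem_toFinset.1 hc))]
    omega
  · rw [if_neg hji]
    by_cases hm : i ∈ CC ps j
    · rw [if_pos hm]
      have hrj : Reach ps j := reach_of_mem ps i j hri hm
      obtain ⟨c₀, hc₀, hm₀⟩ := chain_pred ps hg i j hj hrj hji hm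
      rw [Finset.sum_eq_single_of_mem c₀ (List.mem_toFinset.2 hc₀)]
      · rw [if_pos hm₀]
      · intro b hb hbne
        rw [if_neg]
        intro hbm
        exact hbne (chain_child_unique ps hg i j b c₀ hj hrj (List.mem_toFinset.1 hb) hc₀ hbm hm₀)
    · rw [if_neg hm]
      symm
      have : ∑ c ∈ (childL ps i).toFinset, (if c ∈ CC ps j then (1:Nat) else 0) = 0 := by
        apply Finset.sum_eq_zero
        intro c hc
        rw [if_neg]
        intro hcm
        exact hm ((chain_decomp ps hg i j hi hri hj hji).2 ⟨c, List.mem_toFinset.1 hc, hcm⟩)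
      omega

-- list sum over range ↔ Finset sum
lemma sum_map_range_eq (n : Nat) (f : Nat → Nat) :
    ((List.range n).map f).sum = ∑ j ∈ Finset.range n, f j := by
  rw [← List.toFinset_range, List.sum_toFinset _ List.nodup_range]

-- the subtree-size recurrence (at reachable nodes)
lemma SS_rec (ps : List Int) (hg : Good ps) (i : Nat) (hi : i < ps.length)
    (hri : Reach ps i) :
    SS ps i = 1 + ((childL ps i).map (SS ps)).sum := by
  have hSS : ∀ m, SS ps m = ∑ j ∈ Finset.range ps.length, (if m ∈ CC ps j then 1 else 0) := by
    intro m
    rw [SS, countP_eq_sum_map, sum_map_range_eq]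
    apply Finset.sum_congr rfl
    intro j hj
    by_cases h : m ∈ CC ps j <;> simp [h]
  rw [hSS]
  have hpt : ∀ j ∈ Finset.range ps.length,
      (if i ∈ CC ps j then (1:Nat) else 0) =
      (if j = i then 1 else 0) +
        ∑ c ∈ (childL ps i).toFinset, (if c ∈ CC ps j then 1 else 0) := by
    intro j hj
    exact indicator_decomp ps hg i j hi hri (Finset.mem_range.1 hj)
  rw [Finset.sum_congr rfl hpt, Finset.sum_add_distrib]
  congr 1
  · rw [Finset.sum_ite_eq' (Finset.range ps.length) i (fun _ => 1),
        if_pos (Finset.mem_range.2 hi)]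
  · rw [Finset.sum_comm]
    rw [← List.sum_toFinset _ (childL_nodup ps i)]
    apply Finset.sum_congr rfl
    intro c hc
    rw [hSS]

-- sum of an Int-cast map
lemma sum_map_natCast (l : List Nat) (f : Nat → Nat) :
    (l.map (fun c => (f c : Int))).sum = (((l.map f).sum : Nat) : Int) := by
  induction l with
  | nil => simp
  | cons x xs ih => simp [ih]

-- ---- the shared child-list build ----
lemma build_fold (ps : List Int) :
    ∀ (L : List Nat) (ch : List (List Nat)), (∀ j ∈ L, pvPar ps j < ch.length) →
      (L.foldl (fun ch i =>
          let q := pvPar ps i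
          ch.set q (ch.getD q [] ++ [i])) ch).length = ch.length ∧
      ∀ i, i < ch.length →
        (L.foldl (fun ch i =>
            let q := pvPar ps i
            ch.set q (ch.getD q [] ++ [i])) ch).getD i [] =
          ch.getD i [] ++ (L.filter (fun j => pvPar ps j = i)) := by
  intro L
  induction L with
  | nil => intro ch h; simp
  | cons j0 L' ihL =>
      intro ch h
      have hq : pvPar ps j0 < ch.length := h j0 (by simp)
      simp only [List.foldl_cons]
      have hlen : (ch.set (pvPar ps j0) (ch.getD (pvPar ps j0) [] ++ [j0])).length = ch.length := by
        simp
      obtain ⟨ih1, ih2⟩ := ihL (ch.set (pvPar ps j0) (ch.getD (pvPar ps j0) [] ++ [j0]))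
        (by intro j hj; rw [hlen]; exact h j (by simp [hj]))
      refine ⟨by rw [ih1, hlen], ?_⟩
      intro i hi
      rw [ih2 i (by omega)]
      by_cases hqi : pvPar ps j0 = i
      · subst hqi
        rw [getD_set_self ch (pvPar ps j0) _ [] hq]
        simp [List.append_assoc]
      · rw [getD_set_ne ch (pvPar ps j0) i _ [] hqi]
        simp [hqi]

lemma buildChild_getD (ps : List Int) (hg : Good ps) (i : Nat) (hi : i < ps.length) :
    (pvBuildChild ps).getD i [] = childL ps i := by
  rw [pvBuildChild, childL]
  obtain ⟨-, h2⟩ := build_fold ps ((List.range ps.length).drop 1)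
    (List.replicate ps.length [])
    (by
      intro j hj
      rw [List.length_replicate]
      obtain ⟨hj1, hj2⟩ := (mem_range_drop_one ps.length j).1 hj
      exact hg.2 j hj2 hj1)
  rw [h2 i (by simpa using hi)]
  rw [getD_replicate ps.length i [] [] hi]
  simp

-- ---- A-side: the DFS computes SS on the root's component ----
lemma dfs_main (ps : List Int) (hg : Good ps) :
    ∀ fuel i num ki, i < ps.length → DepthOf ps i ki → ps.length - ki ≤ fuel →
      num.length = ps.length →
      (∀ j, j < ps.length → i ∈ CC ps j → num.getD j 0 = 1) →
      (pvDfsA (pvBuildChild ps) fuel num i).1.length = ps.length ∧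
      (∀ j, j < ps.length → (pvDfsA (pvBuildChild ps) fuel num i).1.getD j 0 =
        if i ∈ CC ps j then (SS ps j : Int) else num.getD j 0) ∧
      (pvDfsA (pvBuildChild ps) fuel num i).2 = (SS ps i : Int) := by
  intro fuel
  induction fuel with
  | zero =>
      intro i num ki hi hd hfuel hlen hpre
      exfalso
      have := depth_lt ps hg i ki hi hd
      omega
  | succ fuel ih =>
      intro i num ki hi hd hfuel hlen hpre
      have hri : Reach ps i := ⟨ki, hd.1⟩
      have hchild : (pvBuildChild ps).getD i [] = childL ps i := buildChild_getD ps hg i hi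
      have inner : ∀ (L : List Nat), (∀ c ∈ L, c ∈ childL ps i) → L.Nodup →
          ∀ acc : List Int, acc.length = ps.length →
          (∀ j, j < ps.length → (∃ c ∈ L, c ∈ CC ps j) → acc.getD j 0 = 1) →
          (L.foldl (fun acc c =>
              let r := pvDfsA (pvBuildChild ps) fuel acc c
              r.1.set i (r.1.getD i 0 + r.2)) acc).length = ps.length ∧
          ((L.foldl (fun acc c =>
              let r := pvDfsA (pvBuildChild ps) fuel acc c
              r.1.set i (r.1.getD i 0 + r.2)) acc).getD i 0 =
            acc.getD i 0 + (L.map (fun c => (SS ps c : Int))).sum) ∧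
          (∀ j, j < ps.length → j ≠ i →
            (L.foldl (fun acc c =>
                let r := pvDfsA (pvBuildChild ps) fuel acc c
                r.1.set i (r.1.getD i 0 + r.2)) acc).getD j 0 =
              if ∃ c ∈ L, c ∈ CC ps j then (SS ps j : Int) else acc.getD j 0) := by
        intro L
        induction L with
        | nil =>
            intro _ _ acc hacc _
            refine ⟨hacc, by simp, ?_⟩
            intro j hj hji
            simp
        | cons c L' ihL =>
            intro hsub hnd acc hacc hfresh
            obtain ⟨⟨hc1, hclt⟩, hpc⟩ := (mem_childL ps c i).1 (hsub c (by simp))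
            have hc0 : c ≠ 0 := by omega
            have hrc : Reach ps c := reach_child ps c i (hsub c (by simp)) hri
            have hdc : DepthOf ps c (ki+1) := depth_child ps c i ki hc0 hpc hd
            obtain ⟨hr1, hr2, hr3⟩ := ih c acc (ki+1) hclt hdc (by omega) hacc
              (fun j hj hm => hfresh j hj ⟨c, by simp, hm⟩)
            have hnotself : c ∉ CC ps i :=
              chain_no_child_self ps hg i c hi hri (hsub c (by simp))
            set r := pvDfsA (pvBuildChild ps) fuel acc c with hr
            set acc' := r.1.set i (r.1.getD i 0 + r.2) with hacc'
            have hlen' : acc'.length = ps.length := by rw [hacc', List.length_set, hr1]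
            have hgi : acc'.getD i 0 = acc.getD i 0 + (SS ps c : Int) := by
              rw [hacc', getD_set_self r.1 i _ 0 (by omega), hr2 i hi, if_neg hnotself, hr3]
            have hgj : ∀ j, j < ps.length → j ≠ i →
                acc'.getD j 0 = if c ∈ CC ps j then (SS ps j : Int) else acc.getD j 0 := by
              intro j hj hji
              rw [hacc', getD_set_ne r.1 i j _ 0 (fun h => hji h.symm), hr2 j hj]
            obtain ⟨ih1, ih2, ih3⟩ := ihL (fun c' hc' => hsub c' (by simp [hc']))
              (List.Nodup.of_cons hnd) acc' hlen'
              (by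
                intro j hj hm
                obtain ⟨c', hc'L, hc'm⟩ := hm
                have hrc' : Reach ps c' := reach_child ps c' i (hsub c' (by simp [hc'L])) hri
                have hrj : Reach ps j := reach_of_mem ps c' j hrc' hc'm
                have hji : j ≠ i := by
                  intro h; subst h
                  exact chain_no_child_self ps hg j c' hj hri (hsub c' (by simp [hc'L])) hc'm
                rw [hgj j hj hji, if_neg, ]
                · exact hfresh j hj ⟨c', by simp [hc'L], hc'm⟩
                · intro hcm
                  have : c = c' := chain_child_unique ps hg i j c c' hj hrj (hsub c (by simp))
                    (hsub c' (by simp [hc'L])) hcm hc'm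
                  subst this
                  exact (List.nodup_cons.1 hnd).1 hc'L)
            rw [List.foldl_cons]
            refine ⟨ih1, ?_, ?_⟩
            · show _ = acc.getD i 0 + ((c :: L').map (fun c => (SS ps c : Int))).sum
              rw [ih2, hgi]
              simp [add_assoc]
            · intro j hj hji
              rw [ih3 j hj hji]
              by_cases hL' : ∃ c' ∈ L', c' ∈ CC ps j
              · rw [if_pos hL', if_pos]
                obtain ⟨c', h1, h2⟩ := hL'
                exact ⟨c', by simp [h1], h2⟩
              · rw [if_neg hL', hgj j hj hji]
                by_cases hcj : c ∈ CC ps j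
                · rw [if_pos hcj, if_pos ⟨c, by simp, hcj⟩]
                · rw [if_neg hcj, if_neg]
                  rintro ⟨c'', hc'', hm''⟩
                  rcases List.mem_cons.1 hc'' with h | h
                  · exact hcj (h ▸ hm'')
                  · exact hL' ⟨c'', h, hm''⟩
      obtain ⟨in1, in2, in3⟩ := inner (childL ps i) (fun c hc => hc) (childL_nodup ps i)
        num hlen
        (by
          intro j hj hm
          obtain ⟨c, hc, hcm⟩ := hm
          obtain ⟨⟨hc1, -⟩, hpc⟩ := (mem_childL ps c i).1 hc
          have hrc : Reach ps c := reach_child ps c i hc hri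
          have hrj : Reach ps j := reach_of_mem ps c j hrc hcm
          exact hpre j hj (chain_step ps hg c i j hj hrj (by omega) hpc hcm))
      have heq : pvDfsA (pvBuildChild ps) (fuel+1) num i =
          (((pvBuildChild ps).getD i []).foldl (fun acc c =>
              let r := pvDfsA (pvBuildChild ps) fuel acc c
              r.1.set i (r.1.getD i 0 + r.2)) num,
            (((pvBuildChild ps).getD i []).foldl (fun acc c =>
              let r := pvDfsA (pvBuildChild ps) fuel acc c
              r.1.set i (r.1.getD i 0 + r.2)) num).getD i 0) := rfl
      rw [heq, hchild]
      have hnum_i : num.getD i 0 = 1 := hpre i hi (mem_CC_self ps hg i hi hri)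
      have hSSi : (SS ps i : Int) = num.getD i 0 + ((childL ps i).map (fun c => (SS ps c : Int))).sum := by
        rw [hnum_i, SS_rec ps hg i hi hri, sum_map_natCast]
        push_cast
        ring
      have hentry : ∀ j, j < ps.length →
          ((childL ps i).foldl (fun acc c =>
              let r := pvDfsA (pvBuildChild ps) fuel acc c
              r.1.set i (r.1.getD i 0 + r.2)) num).getD j 0 =
            if i ∈ CC ps j then (SS ps j : Int) else num.getD j 0 := by
        intro j hj
        by_cases hji : j = i
        · subst hji
          rw [in2, if_pos (mem_CC_self ps hg j hj hri), ← hSSi]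
        · rw [in3 j hj hji]
          by_cases hm : i ∈ CC ps j
          · rw [if_pos hm, if_pos ((chain_decomp ps hg i j hi hri hj hji).1 hm)]
          · rw [if_neg hm, if_neg]
            intro hex
            exact hm ((chain_decomp ps hg i j hi hri hj hji).2 hex)
      exact ⟨in1, hentry, by rw [hentry i hi, if_pos (mem_CC_self ps hg i hi hri)]⟩

lemma numArr_getD (ps : List Int) (hg : Good ps) (j : Nat) (hj : j < ps.length) :
    (pvDfsA (pvBuildChild ps) (ps.length+1) (List.replicate ps.length (1:Int)) 0).1.getD j 0
      = if 0 ∈ CC ps j then (SS ps j : Int) else 1 := by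
  obtain ⟨-, h2, -⟩ := dfs_main ps hg (ps.length+1) 0 (List.replicate ps.length (1:Int)) 0
    hg.1 (depth_zero ps) (by omega) (by simp)
    (fun j hj _ => getD_replicate ps.length j 1 0 hj)
  rw [h2 j hj]
  by_cases h : 0 ∈ CC ps j
  · rw [if_pos h, if_pos h]
  · rw [if_neg h, if_neg h, getD_replicate ps.length j 1 0 hj]

-- ---- B-side: the stack traversal produces PRE, the reverse pass computes sizes ----

lemma preF_ne_nil (ps : List Int) (f v : Nat) : preF ps f v ≠ [] := by
  cases f <;> simp [preF]

lemma preF_congr (ps : List Int) (hg : Good ps) :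
    ∀ f f' v d, v < ps.length → DepthOf ps v d →
      ps.length ≤ d + f → ps.length ≤ d + f' → preF ps f v = preF ps f' v := by
  intro f
  induction f with
  | zero =>
      intro f' v d hv hd h1 h2
      have := depth_lt ps hg v d hv hd
      omega
  | succ f ih =>
      intro f' v d hv hd h1 h2
      cases f' with
      | zero =>
          have := depth_lt ps hg v d hv hd
          omega
      | succ f' =>
          show (v : Nat) :: _ = v :: _
          congr 1
          apply congrArg List.flatten
          apply List.map_congr_left
          intro c hc
          have hcc : c ∈ childL ps v := List.mem_reverse.1 hc
          obtain ⟨⟨hc1, hclt⟩, hpc⟩ := (mem_childL ps c v).1 hcc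
          have hdc : DepthOf ps c (d+1) := depth_child ps c v d (by omega) hpc hd
          exact ih f' c (d+1) hclt hdc (by omega) (by omega)

lemma PRE_unfold (ps : List Int) (hg : Good ps) (v : Nat) (hv : v < ps.length)
    (hr : Reach ps v) :
    PRE ps v = v :: ((childL ps v).reverse.map (PRE ps)).flatten := by
  obtain ⟨d, hd⟩ := depth_exists ps v hr
  have hdlt : d < ps.length := depth_lt ps hg v d hv hd
  obtain ⟨m, hm⟩ : ∃ m, ps.length = m + 1 := ⟨ps.length - 1, by omega⟩
  have h1 : PRE ps v = preF ps (m+1) v := by rw [PRE, hm]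
  rw [h1]
  show (v : Nat) :: _ = v :: _
  congr 1
  apply congrArg List.flatten
  apply List.map_congr_left
  intro c hc
  have hcc : c ∈ childL ps v := List.mem_reverse.1 hc
  obtain ⟨⟨hc1, hclt⟩, hpc⟩ := (mem_childL ps c v).1 hcc
  have hdc : DepthOf ps c (d+1) := depth_child ps c v d (by omega) hpc hd
  exact preF_congr ps hg m ps.length c (d+1) hclt hdc (by omega) (by omega)

lemma PRE_len (ps : List Int) (hg : Good ps) :
    ∀ g v d, v < ps.length → DepthOf ps v d → ps.length ≤ d + g →
      (PRE ps v).length = SS ps v := by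
  intro g
  induction g with
  | zero =>
      intro v d hv hd h1
      have := depth_lt ps hg v d hv hd
      omega
  | succ g ih =>
      intro v d hv hd h1
      have hr : Reach ps v := ⟨d, hd.1⟩
      rw [PRE_unfold ps hg v hv hr, SS_rec ps hg v hv hr]
      simp only [List.length_cons, List.length_flatten, List.map_map, Function.comp_def]
      have hmapc : ∀ c ∈ (childL ps v).reverse, (PRE ps c).length = SS ps c := by
        intro c hc
        have hcc := List.mem_reverse.1 hc
        obtain ⟨⟨hc1, hclt⟩, hpc⟩ := (mem_childL ps c v).1 hcc
        exact ih c (d+1) hclt (depth_child ps c v d (by omega) hpc hd) (by omega)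
      rw [List.map_congr_left hmapc]
      have : ((childL ps v).reverse.map (SS ps)).sum = ((childL ps v).map (SS ps)).sum := by
        rw [List.map_reverse, List.sum_reverse]
      omega

-- the explicit stack machine emits the concatenated preorders of the stacked nodes
lemma stack_run (ps : List Int) (hg : Good ps) :
    ∀ f (vs acc : List Nat), (∀ v ∈ vs, v < ps.length ∧ Reach ps v) →
      (vs.map (fun v => (PRE ps v).length)).sum ≤ f →
      pvStackOrder (pvBuildChild ps) f vs acc = acc ++ (vs.map (PRE ps)).flatten := by
  intro f
  induction f with
  | zero =>
      intro vs acc hmem hsum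
      cases vs with
      | nil => simp [pvStackOrder]
      | cons v st =>
          exfalso
          have h1 : 1 ≤ (PRE ps v).length := by
            cases hx : PRE ps v with
            | nil => exact absurd hx (preF_ne_nil ps ps.length v)
            | cons a l => simp
          simp only [List.map_cons, List.sum_cons] at hsum
          omega
  | succ f ih =>
      intro vs acc hmem hsum
      cases vs with
      | nil => simp [pvStackOrder]
      | cons v st =>
          obtain ⟨hv, hrv⟩ := hmem v (by simp)
          have hchild : (pvBuildChild ps).getD v [] = childL ps v := buildChild_getD ps hg v hv
          have hlen : (PRE ps v).length
              = ((childL ps v).reverse.map (fun c => (PRE ps c).length)).sum + 1 := by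
            rw [PRE_unfold ps hg v hv hrv]
            simp [List.length_flatten, List.map_map, Function.comp_def]
          have hmem' : ∀ v' ∈ (childL ps v).reverse ++ st, v' < ps.length ∧ Reach ps v' := by
            intro v' hv'
            rcases List.mem_append.1 hv' with h | h
            · have hcc : v' ∈ childL ps v := List.mem_reverse.1 h
              obtain ⟨⟨-, hclt⟩, -⟩ := (mem_childL ps v' v).1 hcc
              exact ⟨hclt, reach_child ps v' v hcc hrv⟩
            · exact hmem v' (by simp [h])
          have hsum' : (((childL ps v).reverse ++ st).map (fun v => (PRE ps v).length)).sum ≤ f := by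
            rw [List.map_append, List.sum_append]
            simp only [List.map_cons, List.sum_cons] at hsum
            omega
          have hstep : pvStackOrder (pvBuildChild ps) (f+1) (v :: st) acc
              = pvStackOrder (pvBuildChild ps) f
                  (((pvBuildChild ps).getD v []).reverse ++ st) (acc ++ [v]) := rfl
          rw [hstep, hchild, ih _ _ hmem' hsum']
          simp [PRE_unfold ps hg v hv hrv, List.map_append, List.flatten_append]

lemma order_eq (ps : List Int) (hg : Good ps) :
    pvStackOrder (pvBuildChild ps) (ps.length+1) [0] [] = PRE ps 0 := by
  have h0 : (0:Nat) < ps.length := hg.1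
  have hr : Reach ps 0 := ⟨0, rfl⟩
  have hlen : (PRE ps 0).length = SS ps 0 :=
    PRE_len ps hg ps.length 0 0 h0 (depth_zero ps) (by omega)
  have hss : SS ps 0 ≤ ps.length := by
    have := List.countP_le_length (p := fun j => decide ((0:Nat) ∈ CC ps j))
      (l := List.range ps.length)
    simpa [SS] using this
  rw [stack_run ps hg (ps.length+1) [0] []
    (by intro v hv; simp at hv; subst hv; exact ⟨h0, hr⟩)
    (by simp only [List.map_cons, List.map_nil, List.sum_cons, List.sum_nil]; omega)]
  simp

-- processing a preorder back-to-front finalises every subtree entry and pushes the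
-- subtree's size into the parent slot
lemma procRev (ps : List Int) (hg : Good ps) :
    ∀ g v d, v < ps.length → DepthOf ps v d → ps.length ≤ d + g →
      ∀ sz : List Int, sz.length = ps.length →
      (∀ j, j < ps.length → v ∈ CC ps j → sz.getD j 0 = 1) →
      ((PRE ps v).reverse.foldl
        (fun sz v => if v = 0 then sz
          else sz.set (pvPar ps v) (sz.getD (pvPar ps v) 0 + sz.getD v 0)) sz).length = ps.length ∧
      (∀ j, j < ps.length →
        ((PRE ps v).reverse.foldl
          (fun sz v => if v = 0 then sz
            else sz.set (pvPar ps v) (sz.getD (pvPar ps v) 0 + sz.getD v 0)) sz).getD j 0 =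
          if v ∈ CC ps j then (SS ps j : Int)
          else sz.getD j 0 + (if v ≠ 0 ∧ j = pvPar ps v then (SS ps v : Int) else 0)) := by
  intro g
  induction g with
  | zero =>
      intro v d hv hd h1
      have := depth_lt ps hg v d hv hd
      omega
  | succ g ih =>
      intro v d hv hd h1 sz hszlen hfresh
      have hr : Reach ps v := ⟨d, hd.1⟩
      have hrw : (PRE ps v).reverse
          = (((childL ps v).reverse.map (PRE ps)).flatten).reverse ++ [v] := by
        rw [PRE_unfold ps hg v hv hr]
        simp
      rw [hrw, List.foldl_append, List.foldl_cons, List.foldl_nil]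
      -- inner induction: the child blocks, processed right-to-left
      have inner : ∀ (L : List Nat), (∀ c ∈ L, c ∈ childL ps v) → L.Nodup →
          ∀ acc : List Int, acc.length = ps.length →
          (∀ j, j < ps.length → (∃ c ∈ L, c ∈ CC ps j) → acc.getD j 0 = 1) →
          (((L.map (PRE ps)).flatten).reverse.foldl
            (fun sz v => if v = 0 then sz
              else sz.set (pvPar ps v) (sz.getD (pvPar ps v) 0 + sz.getD v 0)) acc).length = ps.length ∧
          ((((L.map (PRE ps)).flatten).reverse.foldl
            (fun sz v => if v = 0 then sz
              else sz.set (pvPar ps v) (sz.getD (pvPar ps v) 0 + sz.getD v 0)) acc).getD v 0 =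
            acc.getD v 0 + (L.map (fun c => (SS ps c : Int))).sum) ∧
          (∀ j, j < ps.length → j ≠ v →
            (((L.map (PRE ps)).flatten).reverse.foldl
              (fun sz v => if v = 0 then sz
                else sz.set (pvPar ps v) (sz.getD (pvPar ps v) 0 + sz.getD v 0)) acc).getD j 0 =
              if ∃ c ∈ L, c ∈ CC ps j then (SS ps j : Int) else acc.getD j 0) := by
        intro L
        induction L with
        | nil =>
            intro _ _ acc hacc _
            refine ⟨by simpa using hacc, by simp, ?_⟩
            intro j hj hjv
            simp
        | cons c L' ihL =>
            intro hsub hnd acc hacc hfresh'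
            obtain ⟨⟨hc1, hclt⟩, hpc⟩ := (mem_childL ps c v).1 (hsub c (by simp))
            have hc0 : c ≠ 0 := by omega
            have hrc : Reach ps c := reach_child ps c v (hsub c (by simp)) hr
            have hdc : DepthOf ps c (d+1) := depth_child ps c v d hc0 hpc hd
            have hnotself : c ∉ CC ps v :=
              chain_no_child_self ps hg v c hv hr (hsub c (by simp))
            have hsplit : (((c :: L').map (PRE ps)).flatten).reverse
                = ((L'.map (PRE ps)).flatten).reverse ++ (PRE ps c).reverse := by
              simp
            obtain ⟨ih1, ih2, ih3⟩ := ihL (fun c' hc' => hsub c' (by simp [hc']))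
              (List.Nodup.of_cons hnd) acc hacc
              (fun j hj hm => hfresh' j hj (by
                obtain ⟨c', h1, h2⟩ := hm
                exact ⟨c', by simp [h1], h2⟩))
            set mid := ((L'.map (PRE ps)).flatten).reverse.foldl
              (fun sz v => if v = 0 then sz
                else sz.set (pvPar ps v) (sz.getD (pvPar ps v) 0 + sz.getD v 0)) acc with hmid
            have hmidfresh : ∀ j, j < ps.length → c ∈ CC ps j → mid.getD j 0 = 1 := by
              intro j hj hcm
              have hrj : Reach ps j := reach_of_mem ps c j hrc hcm
              have hjv : j ≠ v := by
                intro h; subst h; exact hnotself hcm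
              rw [ih3 j hj hjv, if_neg]
              · exact hfresh' j hj ⟨c, by simp, hcm⟩
              · rintro ⟨c', hc'L, hc'm⟩
                have : c = c' := chain_child_unique ps hg v j c c' hj hrj
                  (hsub c (by simp)) (hsub c' (by simp [hc'L])) hcm hc'm
                subst this
                exact (List.nodup_cons.1 hnd).1 hc'L
            obtain ⟨bk1, bk2⟩ := ih c (d+1) hclt hdc (by omega) mid ih1 hmidfresh
            rw [hsplit, List.foldl_append]
            rw [← hmid]
            refine ⟨by exact bk1, ?_, ?_⟩
            · rw [bk2 v hv, if_neg hnotself, ih2]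
              rw [if_pos ⟨hc0, hpc.symm⟩]
              simp only [List.map_cons, List.sum_cons]
              ring
            · intro j hj hjv
              rw [bk2 j hj]
              by_cases hcj : c ∈ CC ps j
              · rw [if_pos hcj, if_pos ⟨c, by simp, hcj⟩]
              · rw [if_neg hcj, ih3 j hj hjv]
                have hnotp : ¬ (c ≠ 0 ∧ j = pvPar ps c) := by
                  rintro ⟨-, hjp⟩
                  exact hjv (by rw [hjp, hpc])
                rw [if_neg hnotp]
                by_cases hL' : ∃ c' ∈ L', c' ∈ CC ps j
                · rw [if_pos hL', if_pos (by
                    obtain ⟨c', h1, h2⟩ := hL'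
                    exact ⟨c', by simp [h1], h2⟩)]
                  ring
                · rw [if_neg hL', if_neg (by
                    rintro ⟨c'', hc'', hm''⟩
                    rcases List.mem_cons.1 hc'' with h | h
                    · exact hcj (h ▸ hm'')
                    · exact hL' ⟨c'', h, hm''⟩)]
                  ring
      obtain ⟨in1, in2, in3⟩ := inner (childL ps v).reverse
        (fun c hc => List.mem_reverse.1 hc)
        (List.nodup_reverse.2 (childL_nodup ps v))
        sz hszlen
        (by
          intro j hj hm
          obtain ⟨c, hc, hcm⟩ := hm
          have hcc : c ∈ childL ps v := List.mem_reverse.1 hc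
          obtain ⟨⟨hc1, -⟩, hpc⟩ := (mem_childL ps c v).1 hcc
          have hrc : Reach ps c := reach_child ps c v hcc hr
          have hrj : Reach ps j := reach_of_mem ps c j hrc hcm
          exact hfresh j hj (chain_step ps hg c v j hj hrj (by omega) hpc hcm))
      set mid := (((childL ps v).reverse.map (PRE ps)).flatten).reverse.foldl
        (fun sz v => if v = 0 then sz
          else sz.set (pvPar ps v) (sz.getD (pvPar ps v) 0 + sz.getD v 0)) sz with hmid
      have hsum_rev : ((childL ps v).reverse.map (fun c => (SS ps c : Int))).sum
          = ((childL ps v).map (fun c => (SS ps c : Int))).sum := by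
        rw [List.map_reverse, List.sum_reverse]
      have hszv : sz.getD v 0 = 1 := hfresh v hv (mem_CC_self ps hg v hv hr)
      have hmidv : mid.getD v 0 = (SS ps v : Int) := by
        rw [in2, hsum_rev, hszv, SS_rec ps hg v hv hr, sum_map_natCast]
        push_cast
        ring
      have hexists_iff : ∀ j, j < ps.length → j ≠ v →
          ((∃ c ∈ (childL ps v).reverse, c ∈ CC ps j) ↔ v ∈ CC ps j) := by
        intro j hj hjv
        rw [chain_decomp ps hg v j hv hr hj hjv]
        constructor
        · rintro ⟨c, hc, hm⟩; exact ⟨c, List.mem_reverse.1 hc, hm⟩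
        · rintro ⟨c, hc, hm⟩; exact ⟨c, List.mem_reverse.2 hc, hm⟩
      by_cases hv0 : v = 0
      · subst hv0
        rw [if_pos rfl]
        refine ⟨in1, ?_⟩
        intro j hj
        by_cases hj0 : j = 0
        · subst hj0
          rw [if_pos (mem_CC_self ps hg 0 hj hr)]
          exact hmidv
        · rw [in3 j hj hj0]
          by_cases hm : (0:Nat) ∈ CC ps j
          · rw [if_pos ((hexists_iff j hj hj0).2 hm), if_pos hm]
          · rw [if_neg (fun h => hm ((hexists_iff j hj hj0).1 h)), if_neg hm]
            simp
      · rw [if_neg hv0]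
        have hplt : pvPar ps v < ps.length := hg.2 v hv (by omega)
        have hvnotp : v ∉ CC ps (pvPar ps v) := not_mem_CC_parent ps hg v d hv hv0 hd
        have hpne : pvPar ps v ≠ v := by
          intro h
          exact hvnotp (by rw [h]; exact mem_CC_self ps hg v hv hr)
        have hmidp : mid.getD (pvPar ps v) 0 = sz.getD (pvPar ps v) 0 := by
          rw [in3 (pvPar ps v) hplt hpne, if_neg]
          rintro ⟨c, hc, hm⟩
          have hcc : c ∈ childL ps v := List.mem_reverse.1 hc
          obtain ⟨⟨hc1, -⟩, hpc⟩ := (mem_childL ps c v).1 hcc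
          have hrc : Reach ps c := reach_child ps c v hcc hr
          have hrp : Reach ps (pvPar ps v) := reach_of_mem ps c (pvPar ps v) hrc hm
          exact hvnotp (chain_step ps hg c v (pvPar ps v) hplt hrp (by omega) hpc hm)
        refine ⟨by simp [in1], ?_⟩
        intro j hj
        by_cases hjp : j = pvPar ps v
        · subst hjp
          rw [getD_set_self mid _ _ 0 (by omega), hmidp, hmidv,
              if_neg hvnotp, if_pos ⟨hv0, rfl⟩]
        · rw [getD_set_ne mid _ j _ 0 (fun h => hjp h.symm)]
          by_cases hjv : j = v
          · subst hjv
            rw [if_pos (mem_CC_self ps hg j hj hr), hmidv]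
          · rw [in3 j hj hjv]
            by_cases hm : v ∈ CC ps j
            · rw [if_pos ((hexists_iff j hj hjv).2 hm), if_pos hm]
            · rw [if_neg (fun h => hm ((hexists_iff j hj hjv).1 h)), if_neg hm,
                  if_neg (by rintro ⟨-, h⟩; exact hjp h)]
              ring

lemma sizeArr_getD (ps : List Int) (hg : Good ps) (j : Nat) (hj : j < ps.length) :
    ((pvStackOrder (pvBuildChild ps) (ps.length+1) [0] []).reverse.foldl
      (fun sz v => if v = 0 then sz
        else sz.set (pvPar ps v) (sz.getD (pvPar ps v) 0 + sz.getD v 0))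
      (List.replicate ps.length (1:Int))).getD j 0
      = if 0 ∈ CC ps j then (SS ps j : Int) else 1 := by
  rw [order_eq ps hg]
  obtain ⟨-, h2⟩ := procRev ps hg ps.length 0 0 hg.1 (depth_zero ps) (by omega)
    (List.replicate ps.length (1:Int)) (by simp)
    (fun j hj _ => getD_replicate ps.length j 1 0 hj)
  rw [h2 j hj]
  by_cases h : (0:Nat) ∈ CC ps j
  · rw [if_pos h, if_pos h]
  · rw [if_neg h, if_neg h, getD_replicate ps.length j 1 0 hj]
    simp

lemma prodArr_getD (ps : List Int) (hg : Good ps) (size : List Int) (i : Nat) (hi : i < ps.length) :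
    (((List.range ps.length).drop 1).foldl
        (fun pr j => pr.set (pvPar ps j) (pr.getD (pvPar ps j) 1 * size.getD j 0))
        (List.replicate ps.length (1:Int))).getD i 1
      = ((childL ps i).map (fun c => size.getD c 0)).prod := by
  have gen : ∀ (L : List Nat) (pr : List Int), (∀ j ∈ L, 1 ≤ j ∧ j < ps.length) →
      pr.length = ps.length →
      (L.foldl (fun pr j => pr.set (pvPar ps j) (pr.getD (pvPar ps j) 1 * size.getD j 0)) pr).length = ps.length ∧
      (∀ i', i' < ps.length →
        (L.foldl (fun pr j => pr.set (pvPar ps j) (pr.getD (pvPar ps j) 1 * size.getD j 0)) pr).getD i' 1 =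
          pr.getD i' 1 * ((L.filter (fun j => pvPar ps j = i')).map (fun c => size.getD c 0)).prod) := by
    intro L
    induction L with
    | nil => intro pr _ hl; refine ⟨hl, ?_⟩; intro i' hi'; simp
    | cons j0 L' ihL =>
        intro pr hmem hl
        obtain ⟨hj01, hj02⟩ := hmem j0 (by simp)
        have hq : pvPar ps j0 < ps.length := hg.2 j0 hj02 hj01
        have hl' : (pr.set (pvPar ps j0) (pr.getD (pvPar ps j0) 1 * size.getD j0 0)).length = ps.length := by
          simp [hl]
        obtain ⟨ih1, ih2⟩ := ihL (pr.set (pvPar ps j0) (pr.getD (pvPar ps j0) 1 * size.getD j0 0))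
          (fun j hj => hmem j (by simp [hj])) hl'
        rw [List.foldl_cons]
        refine ⟨ih1, ?_⟩
        intro i' hi'
        rw [ih2 i' hi', List.filter_cons]
        by_cases hqi : pvPar ps j0 = i'
        · subst hqi
          rw [getD_set_self pr (pvPar ps j0) _ 1 (by omega)]
          simp [mul_comm, mul_assoc, mul_left_comm]
        · rw [getD_set_ne pr (pvPar ps j0) i' _ 1 hqi]
          simp [hqi]
  obtain ⟨-, h2⟩ := gen ((List.range ps.length).drop 1) (List.replicate ps.length (1:Int))
    (fun j hj => (mem_range_drop_one ps.length j).1 hj) (by simp)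
  rw [h2 i hi, getD_replicate ps.length i 1 1 hi, childL]
  ring

-- a foldl-multiply is the product of the mapped list
lemma foldl_mul (l : List Nat) (f : Nat → Int) (a : Int) :
    l.foldl (fun s c => s * f c) a = a * (l.map f).prod := by
  induction l generalizing a with
  | nil => simp
  | cons x xs ih => simp [ih, mul_assoc]

-- the max/count update step only depends on the score value
lemma step_eq (sA sB : Int) (st : Int × Int) (h : sA = sB) :
    (if sA > st.1 then (sA, (1:Int)) else if sA = st.1 then (st.1, st.2+1) else st)
  = (if sB > st.1 then (sB, (1:Int)) else if sB = st.1 then (st.1, st.2+1) else st) := by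
  rw [h]

-- ===== VERDICT (by name: the statement is the Claim_ definition above) =====
theorem countHighestScoreNodes_spec : Claim_equal_countHighestScoreNodes := by
  intro ps hdom hpre
  have hg := good_of_pre ps hpre
  show countHighestScoreNodes ps = countHighestScoreNodes_alt ps
  simp only [countHighestScoreNodes, countHighestScoreNodes_alt]
  apply congrArg Prod.snd
  apply PySem.List.foldl_congr_mem
  intro st i hmem
  have hi : i < ps.length := List.mem_range.1 hmem
  have hchild := buildChild_getD ps hg i hi
  have harr : ∀ m, m < ps.length →
      (pvDfsA (pvBuildChild ps) (ps.length+1) (List.replicate ps.length (1:Int)) 0).1.getD m 0 =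
      ((pvStackOrder (pvBuildChild ps) (ps.length+1) [0] []).reverse.foldl
        (fun sz v => if v = 0 then sz
          else sz.set (pvPar ps v) (sz.getD (pvPar ps v) 0 + sz.getD v 0))
        (List.replicate ps.length (1:Int))).getD m 0 := by
    intro m hm
    rw [numArr_getD ps hg m hm, sizeArr_getD ps hg m hm]
  have hbase : ((pvBuildChild ps).getD i []).foldl
      (fun s c => s * (pvDfsA (pvBuildChild ps) (ps.length+1)
        (List.replicate ps.length (1:Int)) 0).1.getD c 0) 1 =
      (((List.range ps.length).drop 1).foldl
        (fun pr j => pr.set (pvPar ps j) (pr.getD (pvPar ps j) 1 *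
          ((pvStackOrder (pvBuildChild ps) (ps.length+1) [0] []).reverse.foldl
            (fun sz v => if v = 0 then sz
              else sz.set (pvPar ps v) (sz.getD (pvPar ps v) 0 + sz.getD v 0))
            (List.replicate ps.length (1:Int))).getD j 0))
        (List.replicate ps.length (1:Int))).getD i 1 := by
    rw [hchild, foldl_mul, one_mul,
        prodArr_getD ps hg ((pvStackOrder (pvBuildChild ps) (ps.length+1) [0] []).reverse.foldl
          (fun sz v => if v = 0 then sz
            else sz.set (pvPar ps v) (sz.getD (pvPar ps v) 0 + sz.getD v 0))
          (List.replicate ps.length (1:Int))) i hi]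
    apply congrArg List.prod
    apply List.map_congr_left
    intro c hc
    obtain ⟨⟨-, hclt⟩, -⟩ := (mem_childL ps c i).1 hc
    rw [harr c hclt]
  apply step_eq
  by_cases h0 : i = 0
  · subst h0
    rw [if_neg (by simp), if_pos rfl]
    exact hbase
  · rw [if_pos h0, if_neg h0]
    rw [hbase, harr 0 hg.1, harr i hi]
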